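-- pv_equiv track=rewrite | github.com/omniscoder/Helix | src/helix/pcr/rules.py | _find_k_mismatch_hits
-- ===== SOURCE A (Python) =====
-- from typing import Dict, List, Tuple
--
-- def _find_k_mismatch_hits(seq: str, query: str, k: int) -> List[int]:
--     seq = seq.upper()
--     query = query.upper()
--     hits: List[int] = []
--     n, m = len(seq), len(query)
--     if m == 0 or n < m:
--         return hits
--     for i in range(0, n - m + 1):
--         mismatches = 0
--         for j in range(m):
--             if seq[i + j] != query[j]:
--                 mismatches += 1
--                 if mismatches > k:
--                     break
--         if mismatches <= k:
--             hits.append(i)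
--     return hits
-- ===== SOURCE B (Python) =====
-- def _find_k_mismatch_hits(seq: str, query: str, k: int):
--     seq = seq.upper()
--     query = query.upper()
--     n, m = len(seq), len(query)
--     if m == 0 or n < m:
--         return []
--     w = n - m + 1
--     # column-wise: one mismatch counter per alignment, updated one query position at a time
--     mism = [0] * w
--     for j, qc in enumerate(query):
--         mism = [c + (seq[i + j] != qc) for i, c in enumerate(mism)]
--     return [i for i, c in enumerate(mism) if c <= k]
-- ===== Notes on version B (the rewrite author's own statement) =====
-- stated objective: alternative
-- what changed: B transposes the loops: instead of scanning each window with an early-break mismatch counter, it keeps one mismatch counter per alignment and sweeps the query column-wise over all alignments at once, then emits the alignments whose counter is at most k.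
import Mathlib
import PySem

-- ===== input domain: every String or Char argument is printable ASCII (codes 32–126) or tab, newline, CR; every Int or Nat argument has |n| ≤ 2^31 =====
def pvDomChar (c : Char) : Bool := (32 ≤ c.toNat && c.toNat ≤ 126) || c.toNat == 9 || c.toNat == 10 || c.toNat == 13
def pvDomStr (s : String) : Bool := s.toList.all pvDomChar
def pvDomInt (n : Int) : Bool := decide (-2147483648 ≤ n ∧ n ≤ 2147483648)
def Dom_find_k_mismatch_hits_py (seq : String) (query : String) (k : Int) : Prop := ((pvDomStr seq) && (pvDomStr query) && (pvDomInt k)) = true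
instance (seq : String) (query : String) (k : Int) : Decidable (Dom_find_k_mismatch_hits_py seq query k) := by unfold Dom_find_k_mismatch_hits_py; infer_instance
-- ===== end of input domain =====

-- B replaces A's per-window scan with early break by a column-wise sweep keeping one
-- mismatch counter per alignment (objective: alternative decomposition, same cost class).

-- ===== PORT A =====
-- inner 'for j in range(m)' loop of A, with the 'break' once mismatches > k
-- (string indexing seq[i+j] / query[j] is always in range here, so List.getD is exact)
def aInner (s q : List Char) (i : Nat) (k : Int) : List Nat → Int → Int
  | [], mism => mism
  | j :: rest, mism =>
      if s.getD (i + j) ' ' ≠ q.getD j ' ' then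
        let m' := mism + 1
        if m' > k then m' else aInner s q i k rest m'
      else aInner s q i k rest mism

def find_k_mismatch_hits_py (seq : String) (query : String) (k : Int) : List Int :=
  let s := (PySem.Str.upper seq).toList
  let q := (PySem.Str.upper query).toList
  let n := s.length
  let m := q.length
  if m = 0 ∨ n < m then []
  else
    (List.range (n - m + 1)).foldl
      (fun hits i =>
        let mismatches := aInner s q i k (List.range m) 0
        if mismatches ≤ k then hits ++ [Int.ofNat i] else hits) []

-- ===== PORT B =====
-- one column step: mism = [c + (seq[i+j] != qc) for i, c in enumerate(mism)]
-- (i + j ≥ 0 always, so .toNat indexing is exact Python indexing)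
def bStep (s : List Char) (j : Int) (qc : Char) (cnt : List Int) : List Int :=
  (PySem.List.enumerate cnt).map
    (fun p => p.2 + (if s.getD (p.1 + j).toNat ' ' ≠ qc then 1 else 0))

def find_k_mismatch_hits_py_alt (seq : String) (query : String) (k : Int) : List Int :=
  let s := (PySem.Str.upper seq).toList
  let q := (PySem.Str.upper query).toList
  let n := s.length
  let m := q.length
  if m = 0 ∨ n < m then []
  else
    let w := n - m + 1
    let mism := (PySem.List.enumerate q).foldl
      (fun cnt p => bStep s p.1 p.2 cnt) (List.replicate w (0 : Int))
    ((PySem.List.enumerate mism).filter (fun p => decide (p.2 ≤ k))).map (·.1)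

-- ===== PRECONDITION & SPEC =====
def Spec_find_k_mismatch_hits_py (seq : String) (query : String) (k : Int) (out : List Int) : Prop := out = find_k_mismatch_hits_py_alt seq query k
instance (seq : String) (query : String) (k : Int) (out : List Int) : Decidable (Spec_find_k_mismatch_hits_py seq query k out) := by unfold Spec_find_k_mismatch_hits_py; infer_instance

-- ===== CLAIM (what is proved, stated in full; the proofs are below) =====
def Claim_equal_find_k_mismatch_hits_py : Prop := ∀ (seq : String) (query : String) (k : Int), Dom_find_k_mismatch_hits_py seq query k → Spec_find_k_mismatch_hits_py seq query k (find_k_mismatch_hits_py seq query k)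

-- ===== LEMMAS AND PROOFS =====

-- A's inner loop result is ≤ k iff the FULL mismatch count (no break) is ≤ k
lemma aInner_le_iff (s q : List Char) (i : Nat) (k : Int) :
    ∀ (js : List Nat) (mism : Int),
      (aInner s q i k js mism ≤ k) ↔
        (mism ≤ k ∧ mism + (js.countP (fun j => s.getD (i + j) ' ' ≠ q.getD j ' ') : Int) ≤ k) := by
  intro js
  induction js with
  | nil => intro mism; simp [aInner]
  | cons j rest ih =>
      intro mism
      by_cases hj : s.getD (i + j) ' ' ≠ q.getD j ' '
      · have hj' : ¬ s[i + j]?.getD ' ' = q[j]?.getD ' ' := by simpa using hj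
        have hcnt : (j :: rest).countP (fun j => s.getD (i + j) ' ' ≠ q.getD j ' ')
            = rest.countP (fun j => s.getD (i + j) ' ' ≠ q.getD j ' ') + 1 := by
          simp [hj']
        rw [hcnt]
        simp only [aInner, if_pos hj]
        by_cases hk : mism + 1 > k
        · simp only [if_pos hk]
          push_cast
          omega
        · simp only [if_neg hk]
          rw [ih (mism + 1)]
          push_cast
          omega
      · have hj' : s[i + j]?.getD ' ' = q[j]?.getD ' ' := by simpa using hj
        have hcnt : (j :: rest).countP (fun j => s.getD (i + j) ' ' ≠ q.getD j ' ')
            = rest.countP (fun j => s.getD (i + j) ' ' ≠ q.getD j ' ') := by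
          simp [hj']
        rw [hcnt]
        simp only [aInner, if_neg hj]
        exact ih mism

-- bStep preserves length and acts pointwise
lemma bStep_length (s : List Char) (j : Int) (qc : Char) (cnt : List Int) :
    (bStep s j qc cnt).length = cnt.length := by
  simp [bStep, PySem.List.length_enumerate]

lemma bStep_getD (s : List Char) (j : Int) (qc : Char) (cnt : List Int) (i : Nat)
    (h : i < cnt.length) :
    (bStep s j qc cnt).getD i 0 =
      cnt.getD i 0 + (if s.getD (((i:Int) + j).toNat) ' ' ≠ qc then 1 else 0) := by
  have h' : i < (bStep s j qc cnt).length := by rw [bStep_length]; exact h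
  rw [List.getD_eq_getElem _ _ h', List.getD_eq_getElem _ _ h]
  simp [bStep, PySem.List.getElem_enumerate]

-- the fold over the enumerated query: counter i accumulates the mismatch count of row i
lemma bFold_length (s : List Char) :
    ∀ (qs : List Char) (j0 : Int) (cnt : List Int),
      ((PySem.List.enumerate qs j0).foldl (fun cnt p => bStep s p.1 p.2 cnt) cnt).length
        = cnt.length := by
  intro qs
  induction qs with
  | nil => intro j0 cnt; simp [PySem.List.enumerate_nil]
  | cons c cs ih =>
      intro j0 cnt
      rw [PySem.List.enumerate_cons, List.foldl_cons, ih, bStep_length]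

lemma bFold_getD (s : List Char) :
    ∀ (qs : List Char) (j0 : Int) (cnt : List Int) (i : Nat), i < cnt.length →
      ((PySem.List.enumerate qs j0).foldl (fun cnt p => bStep s p.1 p.2 cnt) cnt).getD i 0
        = cnt.getD i 0 +
          ((PySem.List.enumerate qs j0).countP
            (fun p => s.getD (((i:Int) + p.1).toNat) ' ' ≠ p.2) : Int) := by
  intro qs
  induction qs with
  | nil => intro j0 cnt i h; simp [PySem.List.enumerate_nil]
  | cons c cs ih =>
      intro j0 cnt i h
      rw [PySem.List.enumerate_cons, List.foldl_cons, List.countP_cons,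
        ih (j0 + 1) (bStep s j0 c cnt) i (by rw [bStep_length]; exact h),
        bStep_getD s j0 c cnt i h]
      simp only [decide_eq_true_eq]
      push_cast
      ring

-- the mismatch count over the enumerated query equals the count over range m with getD lookups
lemma count_enum_eq (s : List Char) (i : Nat) :
    ∀ (qs : List Char) (j0 : Nat),
      (PySem.List.enumerate qs (j0:Int)).countP
          (fun p => s.getD (((i:Int) + p.1).toNat) ' ' ≠ p.2)
        = ((List.range' j0 qs.length).countP
            (fun j => s.getD (i + j) ' ' ≠ qs.getD (j - j0) ' ')) := by
  intro qs
  induction qs with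
  | nil => intro j0; simp [PySem.List.enumerate_nil]
  | cons c cs ih =>
      intro j0
      rw [PySem.List.enumerate_cons, List.countP_cons, List.length_cons, List.range'_succ,
        List.countP_cons]
      have h1 : (((i:Int) + (j0:Int)).toNat) = i + j0 := by omega
      have h2 : ((j0:Int) + 1) = ((j0 + 1 : Nat) : Int) := by push_cast; ring
      rw [h1, h2, ih (j0 + 1)]
      have h3 : ∀ j ∈ List.range' (j0+1) cs.length,
          (decide (s.getD (i + j) ' ' ≠ cs.getD (j - (j0+1)) ' ') = true
            ↔ decide (s.getD (i + j) ' ' ≠ (c :: cs).getD (j - j0) ' ') = true) := by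
        intro j hj
        have hle : j0 + 1 ≤ j := (List.mem_range'_1.mp hj).1
        have hsub : j - j0 = (j - (j0+1)) + 1 := by omega
        rw [hsub, List.getD_cons_succ]
      rw [List.countP_congr h3]
      simp

-- specialisation of count_enum_eq at start 0
lemma count_enum_zero (s : List Char) (i : Nat) (qs : List Char) :
    (PySem.List.enumerate qs 0).countP
        (fun p => s.getD (((i:Int) + p.1).toNat) ' ' ≠ p.2)
      = (List.range qs.length).countP
          (fun j => s.getD (i + j) ' ' ≠ qs.getD j ' ') := by
  have h := count_enum_eq s i qs 0
  simpa [← List.range_eq_range'] using h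

-- final comprehension: filtering an enumerated counter list whose entries follow g
lemma final_filter (k : Int) (g : Nat → Int) :
    ∀ (cnt : List Int) (s0 : Nat),
      (∀ i, i < cnt.length → cnt.getD i 0 = g (s0 + i)) →
      ((PySem.List.enumerate cnt (s0:Int)).filter (fun p => decide (p.2 ≤ k))).map (·.1)
        = ((List.range' s0 cnt.length).filter (fun i => decide (g i ≤ k))).map
            (fun i => Int.ofNat i) := by
  intro cnt
  induction cnt with
  | nil => intro s0 h; simp [PySem.List.enumerate_nil]
  | cons c cs ih =>
      intro s0 h
      have hc : c = g s0 := by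
        have := h 0 (by simp)
        simpa using this
      have h2 : ((s0:Int) + 1) = ((s0 + 1 : Nat) : Int) := by push_cast; ring
      rw [PySem.List.enumerate_cons, List.length_cons, List.range'_succ, h2]
      have ih' := ih (s0 + 1) (fun i hi => by
        have := h (i + 1) (by simpa using Nat.succ_lt_succ hi)
        rw [show s0 + (i + 1) = s0 + 1 + i by omega] at this
        simpa using this)
      by_cases hk : g s0 ≤ k
      · rw [List.filter_cons_of_pos (by simp [hc, hk]),
          List.filter_cons_of_pos (by simp [hk]), List.map_cons, List.map_cons, ih']
        rfl
      · rw [List.filter_cons_of_neg (by simp [hc, hk]),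
          List.filter_cons_of_neg (by simp [hk]), ih']

-- specialisation of final_filter at start 0
lemma final_filter_zero (k : Int) (g : Nat → Int) (cnt : List Int)
    (h : ∀ i, i < cnt.length → cnt.getD i 0 = g i) :
    ((PySem.List.enumerate cnt 0).filter (fun p => decide (p.2 ≤ k))).map (·.1)
      = ((List.range cnt.length).filter (fun i => decide (g i ≤ k))).map
          (fun i => Int.ofNat i) := by
  have h2 := final_filter k g cnt 0 (by intro i hi; simpa using h i hi)
  simpa [← List.range_eq_range'] using h2

-- ===== VERDICT (by name: the statement is the Claim_ definition above) =====
theorem find_k_mismatch_hits_py_spec : Claim_equal_find_k_mismatch_hits_py := by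
  intro seq query k _
  unfold Spec_find_k_mismatch_hits_py
  simp only [find_k_mismatch_hits_py, find_k_mismatch_hits_py_alt]
  generalize (PySem.Str.upper seq).toList = s
  generalize (PySem.Str.upper query).toList = q
  split_ifs with hdeg
  · rfl
  · -- A side: foldl-append-if → map ∘ filter over range
    have hA := PySem.List.foldl_append_if
      (p := fun i => decide (aInner s q i k (List.range q.length) 0 ≤ k))
      (f := fun i => Int.ofNat i)
      (List.range (s.length - q.length + 1)) []
    simp only [decide_eq_true_eq] at hA
    rw [hA]
    -- B side: pointwise characterisation of the counter list
    set L := (PySem.List.enumerate q).foldl (fun cnt p => bStep s p.1 p.2 cnt)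
      (List.replicate (s.length - q.length + 1) (0 : Int)) with hL
    have hlen : L.length = s.length - q.length + 1 := by
      rw [hL, bFold_length, List.length_replicate]
    have hget : ∀ i, i < L.length →
        L.getD i 0 = ((((List.range q.length).countP
          (fun j => s.getD (i + j) ' ' ≠ q.getD j ' ')) : Nat) : Int) := by
      intro i hi
      rw [hL, bFold_getD s q 0 _ i (by rw [List.length_replicate]; exact hlen ▸ hi)]
      rw [count_enum_zero s i q]
      simp
    rw [final_filter_zero k
      (fun i => ((((List.range q.length).countP
        (fun j => s.getD (i + j) ' ' ≠ q.getD j ' ')) : Nat) : Int)) L hget]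
    rw [hlen]
    simp only [List.nil_append]
    congr 1
    apply List.filter_congr
    intro i _
    simp only [decide_eq_decide]
    rw [aInner_le_iff]
    constructor
    · intro ⟨_, h2⟩; omega
    · intro hle
      have : (0:Int) ≤ ((List.range q.length).countP
          (fun j => s.getD (i + j) ' ' ≠ q.getD j ' ') : Int) := by positivity
      exact ⟨by omega, by omega⟩
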